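-- pv_equiv track=rewrite | github.com/dirkmo/prim | src/tokenizer.py | merge_string_fragments
-- ===== SOURCE A (Python) =====
-- def merge_string_fragments(fragments):
--     ## merge strings like "Hello World" to single fragment
--     merge = []
--     nfl = [] # new fragment list
--     stringfragment = False
--     for i in range(len(fragments)):
--         f = fragments[i]
--         if (not stringfragment):
--             if (len(f) > 0) and (f[0] == '"'):
--                 # start of string literal
--                 stringfragment = True
--                 merge = []
--                 merge.append(f)
--             else:
--                 nfl.append(f)
--         else:
--             if (len(f) > 0) and (f[-1] == '"'):
--                 # end of string literal
--                 merge.append(f)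
--                 nfl.append("".join(merge))
--                 stringfragment = False
--             else:
--                 merge.append(f)
--     assert stringfragment == False, f"ERROR: String literal {merge} missing double quote"
--     return nfl
-- ===== SOURCE B (Python) =====
-- def merge_string_fragments(fragments):
--     ## merge strings like "Hello World" to single fragment
--     nfl = []
--     it = iter(fragments)
--     for f in it:
--         if f.startswith('"'):
--             merge = [f]
--             for g in it:
--                 merge.append(g)
--                 if g.endswith('"'):
--                     break
--             else:
--                 raise AssertionError(f"ERROR: String literal {merge} missing double quote")
--             nfl.append("".join(merge))
--         else:
--             nfl.append(f)
--     return nfl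
-- ===== Notes on version B (the rewrite author's own statement) =====
-- stated objective: simpler
-- what changed: Replaced A's single loop with a boolean stringfragment state flag by a nested loop over one shared iterator: the inner loop consumes fragments until the closing quote, so the flag and the cross-iteration merge buffer disappear.
import Mathlib
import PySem

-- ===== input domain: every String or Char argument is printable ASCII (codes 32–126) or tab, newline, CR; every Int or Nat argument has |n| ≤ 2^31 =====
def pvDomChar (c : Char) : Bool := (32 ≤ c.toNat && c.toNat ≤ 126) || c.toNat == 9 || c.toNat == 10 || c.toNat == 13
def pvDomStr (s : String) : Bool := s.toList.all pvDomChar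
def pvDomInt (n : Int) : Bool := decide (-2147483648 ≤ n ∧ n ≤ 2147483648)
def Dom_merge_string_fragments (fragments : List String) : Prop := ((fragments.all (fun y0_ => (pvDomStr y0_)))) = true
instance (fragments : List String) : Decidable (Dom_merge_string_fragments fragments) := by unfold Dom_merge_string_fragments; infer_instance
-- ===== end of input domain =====

-- B replaces A's boolean state flag by an idiomatic nested loop over one shared iterator (inner loop consumes fragments until the closing quote); objective: simpler.
-- Both programs raise AssertionError on an unterminated string literal; Pre_ excludes exactly those inputs.

-- ===== PORT A =====
-- A's loop body, one step of the fold over (merge, nfl, stringfragment)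
def pvStepA (st : List String × List String × Bool) (f : String) : List String × List String × Bool :=
  let merge := st.1; let nfl := st.2.1; let stringfragment := st.2.2
  if !stringfragment then
    if PySem.Str.len f > 0 && (PySem.Str.pyGet? f 0 == some '"') then
      ([f], nfl, true)                                   -- start of string literal
    else (merge, nfl ++ [f], false)
  else
    if PySem.Str.len f > 0 && (PySem.Str.pyGet? f (-1) == some '"') then
      (merge ++ [f], nfl ++ [PySem.Str.join "" (merge ++ [f])], false)   -- end of string literal
    else (merge ++ [f], nfl, true)

def merge_string_fragments (fragments : List String) : List String :=
  let st := fragments.foldl pvStepA ([], [], false)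
  -- assert stringfragment == False: Pre_ excludes st.2.2 = true (Python raises there)
  st.2.1

-- ===== PORT B =====
mutual
-- outer 'for f in it'
def pvAltGo : List String → List String
  | [] => []
  | f :: it =>
    if PySem.Str.startswith f "\"" then pvAltInner [f] it
    else f :: pvAltGo it
-- inner 'for g in it: merge.append(g); if g.endswith('"'): break' — on break, emit "".join(merge);
-- exhaustion (for-else) is where B raises: Pre_ excludes it, the port just ends the output
def pvAltInner (merge : List String) : List String → List String
  | [] => []
  | g :: it =>
    if PySem.Str.endswith g "\"" then PySem.Str.join "" (merge ++ [g]) :: pvAltGo it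
    else pvAltInner (merge ++ [g]) it
end

def merge_string_fragments_alt (fragments : List String) : List String := pvAltGo fragments

-- ===== PRECONDITION & SPEC =====
-- Pre_ excludes exactly the inputs with an unterminated string literal, on which Python A raises AssertionError
-- (the scan flag must end False).
def Pre_merge_string_fragments (fragments : List String) : Prop :=
  (fragments.foldl (fun sf f =>
      if sf then !(PySem.Str.len f > 0 && (PySem.Str.pyGet? f (-1) == some '"'))
      else (PySem.Str.len f > 0 && (PySem.Str.pyGet? f 0 == some '"'))) false) = false
instance (fragments : List String) : Decidable (Pre_merge_string_fragments fragments) := by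
  unfold Pre_merge_string_fragments; infer_instance

def pvWitness_merge_string_fragments : List String := ["\"Hello", "World\"", "x"]

def Spec_merge_string_fragments (fragments : List String) (out : List String) : Prop := out = merge_string_fragments_alt fragments
instance (fragments : List String) (out : List String) : Decidable (Spec_merge_string_fragments fragments out) := by unfold Spec_merge_string_fragments; infer_instance

-- ===== CLAIM (what is proved, stated in full; the proofs are below) =====
def Claim_equal_merge_string_fragments : Prop := ∀ (fragments : List String), Dom_merge_string_fragments fragments → Pre_merge_string_fragments fragments → Spec_merge_string_fragments fragments (merge_string_fragments fragments)

-- ===== LEMMAS AND PROOFS =====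

lemma pvQuoteToList : ("\"" : String).toList = ['"'] := rfl

-- A's opening test (len(f)>0 and f[0]=='"') is B's f.startswith('"')
lemma pvStarts_eq (f : String) :
    (PySem.Str.len f > 0 && (PySem.Str.pyGet? f 0 == some '"')) = PySem.Str.startswith f "\"" := by
  rw [Bool.eq_iff_iff]
  simp only [PySem.Str.len_eq, PySem.Str.pyGet?_eq, PySem.Chars.pyGet?_eq_listPyGet?,
    PySem.Str.startswith_eq, Bool.and_eq_true, decide_eq_true_eq, beq_iff_eq,
    PySem.Chars.startswith_iff, pvQuoteToList]
  cases h : f.toList with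
  | nil => simp
  | cons c t => simp [List.cons_prefix_cons, eq_comm]

-- A's closing test (len(f)>0 and f[-1]=='"') is B's f.endswith('"')
lemma pvEnds_eq (f : String) :
    (PySem.Str.len f > 0 && (PySem.Str.pyGet? f (-1) == some '"')) = PySem.Str.endswith f "\"" := by
  rw [Bool.eq_iff_iff]
  simp only [PySem.Str.len_eq, PySem.Str.pyGet?_eq, PySem.Chars.pyGet?_eq_listPyGet?,
    PySem.List.pyGet?_neg_one, PySem.Str.endswith_eq, Bool.and_eq_true, decide_eq_true_eq,
    beq_iff_eq, PySem.Chars.endswith_iff, pvQuoteToList]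
  constructor
  · rintro ⟨-, hl⟩
    obtain ⟨l', hf⟩ := List.getLast?_eq_some_iff.mp hl
    exact ⟨l', hf.symm⟩
  · rintro ⟨t, ht⟩
    rw [← ht]
    exact ⟨by simp, by simp⟩

-- the fold of A's step from either flag state computes B's recursion, appended to the nfl so far
lemma pvFold_eq (l : List String) :
    (∀ merge nfl, (List.foldl pvStepA (merge, nfl, false) l).2.1 = nfl ++ pvAltGo l)
    ∧ (∀ merge nfl, (List.foldl pvStepA (merge, nfl, true) l).2.1 = nfl ++ pvAltInner merge l) := by
  induction l with
  | nil => exact ⟨fun merge nfl => by simp [pvAltGo], fun merge nfl => by simp [pvAltInner]⟩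
  | cons f t ih =>
    refine ⟨fun merge nfl => ?_, fun merge nfl => ?_⟩
    · simp only [List.foldl_cons, pvStepA, pvStarts_eq, Bool.not_false, if_true]
      cases h : PySem.Str.startswith f "\"" with
      | true =>
        have h' : PySem.Chars.startswith f.toList ['"'] = true := by simpa using h
        simp [h', pvAltGo, ih.2 [f] nfl]
      | false =>
        have h' : PySem.Chars.startswith f.toList ['"'] = false := by simpa using h
        simp [h', pvAltGo, ih.1 merge (nfl ++ [f])]
    · simp only [List.foldl_cons, pvStepA, pvEnds_eq, Bool.not_true]
      cases h : PySem.Str.endswith f "\"" with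
      | true =>
        have h' : PySem.Chars.endswith f.toList ['"'] = true := by simpa using h
        simp [h', pvAltInner, ih.1 (merge ++ [f]) (nfl ++ [PySem.Str.join "" (merge ++ [f])])]
      | false =>
        have h' : PySem.Chars.endswith f.toList ['"'] = false := by simpa using h
        simp [h', pvAltInner, ih.2 (merge ++ [f]) nfl]

-- ===== VERDICT (by name: the statement is the Claim_ definition above) =====
theorem merge_string_fragments_spec : Claim_equal_merge_string_fragments := by
  intro fragments _ _
  unfold Spec_merge_string_fragments merge_string_fragments merge_string_fragments_alt
  simpa using (pvFold_eq fragments).1 [] []
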